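-- pv_equiv track=rewrite | github.com/DarwinJesusNeiraC/LabADAGrupoB | EjerciciosClase5/pickResume.py | pick_resume
-- ===== SOURCE A (Python) =====
-- def pick_resume(resume):
--     eliminate = "top"
--
--     while(len(resume) > 1):
--         if(eliminate == "top"):
--             resume = resume[( int(len(resume)/2 )):( len(resume))]
--             eliminate = "bottom"
--
--         elif(eliminate == "bottom"):
--             resume = resume[0:( int( len(resume)/2 ))]
--             eliminate = "top"
--
--     return resume[0]
-- ===== SOURCE B (Python) =====
-- def pick_resume(resume):
--     lo, hi = 0, len(resume)
--     top = True
--     while hi - lo > 1: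
--         mid = lo + (hi - lo) // 2
--         if top:
--             lo = mid
--         else:
--             hi = mid
--         top = not top
--     return resume[lo]
-- ===== Notes on version B (the rewrite author's own statement) =====
-- stated objective: alternative
-- what changed: Instead of repeatedly slicing the list (copying half of it each round), B keeps two index pointers lo/hi and halves the index interval, indexing the original list once at the end (measured only ~1.3x at the largest size, so no speed claim).
import Mathlib
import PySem

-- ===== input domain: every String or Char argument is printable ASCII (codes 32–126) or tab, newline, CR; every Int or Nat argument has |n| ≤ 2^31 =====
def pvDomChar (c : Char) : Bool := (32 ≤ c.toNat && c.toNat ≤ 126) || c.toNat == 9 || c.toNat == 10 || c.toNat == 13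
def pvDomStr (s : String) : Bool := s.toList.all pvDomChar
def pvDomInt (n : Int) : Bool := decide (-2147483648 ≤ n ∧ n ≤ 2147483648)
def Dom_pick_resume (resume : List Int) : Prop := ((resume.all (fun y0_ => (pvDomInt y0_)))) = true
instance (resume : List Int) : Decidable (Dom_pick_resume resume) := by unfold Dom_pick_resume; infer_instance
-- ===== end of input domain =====

-- B replaces A's repeated list slicing by two index pointers halved in place (no list copies).

-- ===== PORT A =====
-- A's while loop, as structural recursion on a fuel that only makes it total (the list strictly
-- shrinks each iteration, so fuel = initial length always suffices and the 0-fuel branch is never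
-- reached from pick_resume).  `eliminate` only ever holds "top"/"bottom", so the remaining string
-- case (unreachable in A) returns the list unchanged.  int(len/2) on a nonnegative len is len // 2,
-- ported exactly as PySem.Int.floordiv.
def pickLoopA (fuel : Nat) (resume : List Int) (eliminate : String) : List Int :=
  match fuel with
  | 0 => resume
  | fuel + 1 =>
    if resume.length > 1 then
      if eliminate == "top" then
        pickLoopA fuel (PySem.List.slice resume
            (some (PySem.Int.floordiv (resume.length : Int) 2)) (some (resume.length : Int))) "bottom"
      else if eliminate == "bottom" then
        pickLoopA fuel (PySem.List.slice resume
            (some 0) (some (PySem.Int.floordiv (resume.length : Int) 2))) "top"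
      else resume
    else resume

-- return resume[0]; Pre_ excludes the empty list, where Python raises IndexError.
def pick_resume (resume : List Int) : Int :=
  (PySem.List.pyGet? (pickLoopA resume.length resume "top") 0).getD 0

-- ===== PORT B =====
-- B's while loop: halve the [lo, hi) index interval, alternating which end survives; the fuel is
-- only a totality device ((hi - lo) strictly shrinks, so fuel = initial length always suffices).
def altLoopB (fuel : Nat) (lo hi : Int) (top : Bool) : Int :=
  match fuel with
  | 0 => lo
  | fuel + 1 =>
    if hi - lo > 1 then
      let mid := lo + PySem.Int.floordiv (hi - lo) 2
      if top then altLoopB fuel mid hi false else altLoopB fuel lo mid true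
    else lo

def pick_resume_alt (resume : List Int) : Int :=
  (PySem.List.pyGet? resume (altLoopB resume.length 0 (resume.length : Int) true)).getD 0

-- ===== PRECONDITION & SPEC =====
-- A (and B) raise IndexError on the empty list; nothing else is excluded.
def Pre_pick_resume (resume : List Int) : Prop := resume ≠ []
instance (resume : List Int) : Decidable (Pre_pick_resume resume) := by unfold Pre_pick_resume; infer_instance
def pvWitness_pick_resume : List Int := [3, 1, 4, 1, 5]

def Spec_pick_resume (resume : List Int) (out : Int) : Prop := out = pick_resume_alt resume
instance (resume : List Int) (out : Int) : Decidable (Spec_pick_resume resume out) := by unfold Spec_pick_resume; infer_instance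

-- ===== CLAIM (what is proved, stated in full; the proofs are below) =====
def Claim_equal_pick_resume : Prop := ∀ (resume : List Int), Dom_pick_resume resume → Pre_pick_resume resume → Spec_pick_resume resume (pick_resume resume)

-- ===== LEMMAS AND PROOFS =====

-- B's pointer loop stays inside [lo, hi), whatever the fuel.
theorem altLoopB_bounds (fuel : Nat) (lo hi : Int) (top : Bool) (hlt : lo < hi) :
    lo ≤ altLoopB fuel lo hi top ∧ altLoopB fuel lo hi top < hi := by
  induction fuel generalizing lo hi top with
  | zero => simp [altLoopB]; omega
  | succ fuel ih =>
    rw [altLoopB]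
    by_cases h : hi - lo > 1
    · rw [if_pos h]
      have hf : PySem.Int.floordiv (hi - lo) 2 = (hi - lo) / 2 :=
        PySem.Int.floordiv_eq_ediv_of_pos (by omega)
      cases top with
      | true =>
        rw [if_pos rfl]
        have hrec := ih (lo + PySem.Int.floordiv (hi - lo) 2) hi false (by rw [hf]; omega)
        rw [hf] at hrec ⊢
        omega
      | false =>
        rw [if_neg (by simp)]
        have hrec := ih lo (lo + PySem.Int.floordiv (hi - lo) 2) true (by rw [hf]; omega)
        rw [hf] at hrec ⊢
        omega
    · rw [if_neg h]; omega

-- The survivor A computes on the segment full[lo:hi) is full[final lo of B's loop].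
theorem loop_agree (full : List Int) (fuel : Nat) (lo hi : Int) (top : Bool)
    (hfuel : (hi - lo).toNat ≤ fuel) (h0 : 0 ≤ lo) (hlt : lo < hi) (hhi : hi ≤ (full.length : Int)) :
    pickLoopA fuel ((full.drop lo.toNat).take (hi - lo).toNat) (if top then "top" else "bottom")
      = [full.getD (altLoopB fuel lo hi top).toNat 0] := by
  induction fuel generalizing lo hi top with
  | zero => omega
  | succ fuel ih =>
    have hseglen : ((full.drop lo.toNat).take (hi - lo).toNat).length = (hi - lo).toNat := by
      simp only [List.length_take, List.length_drop]; omega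
    rw [pickLoopA, altLoopB]
    by_cases h : hi - lo > 1
    · have hlen : ((full.drop lo.toNat).take (hi - lo).toNat).length > 1 := by omega
      rw [if_pos hlen, if_pos h]
      have hf : PySem.Int.floordiv (hi - lo) 2 = (hi - lo) / 2 :=
        PySem.Int.floordiv_eq_ediv_of_pos (by omega)
      set d : Nat := (hi - lo).toNat with hd
      have hmidN : PySem.Int.floordiv ((((full.drop lo.toNat).take (hi - lo).toNat).length : Int)) 2
          = ((d / 2 : Nat) : Int) := by
        rw [hseglen]; exact_mod_cast PySem.Int.floordiv_natCast d 2
      have hmid_int : lo + PySem.Int.floordiv (hi - lo) 2 = lo + ((d / 2 : Nat) : Int) := by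
        rw [hf]; omega
      cases top with
      | true =>
        rw [if_pos rfl, if_pos (show (("top" : String) == "top") = true by decide)]
        rw [hmidN, hseglen]
        rw [PySem.List.slice_natCast]
        rw [List.drop_take, List.take_take]
        have e1 : ((full.drop lo.toNat).drop (d / 2)) = full.drop (lo + ((d / 2 : Nat) : Int)).toNat := by
          rw [List.drop_drop]; congr 1; omega
        have e2 : min (d - d / 2) (d - d / 2) = (hi - (lo + ((d / 2 : Nat) : Int))).toNat := by
          simp only [min_self]; omega
        rw [e1, e2]
        have hrec := ih (lo + ((d / 2 : Nat) : Int)) hi false (by omega) (by omega) (by omega) hhi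
        rw [if_neg (by simp)] at hrec
        rw [hrec, hmid_int]
        rfl
      | false =>
        rw [show (if false = true then "top" else "bottom") = "bottom" from rfl,
            if_neg (show ¬ ((("bottom" : String) == "top") = true) by decide),
            if_pos (show (("bottom" : String) == "bottom") = true by decide)]
        rw [hmidN, PySem.List.slice_zero_start, PySem.List.slice_to_natCast,
            List.take_take]
        have e2 : min (d / 2) d = (lo + ((d / 2 : Nat) : Int) - lo).toNat := by omega
        rw [e2]
        have hrec := ih lo (lo + ((d / 2 : Nat) : Int)) true (by omega) h0 (by omega) (by omega)
        rw [if_pos rfl] at hrec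
        rw [hrec, hmid_int]
        rfl
    · have hlen : ¬ ((full.drop lo.toNat).take (hi - lo).toNat).length > 1 := by omega
      rw [if_neg hlen, if_neg h]
      have h1 : (hi - lo).toNat = 1 := by omega
      rw [h1]
      have hlt' : lo.toNat < full.length := by omega
      rw [List.take_one, List.head?_drop]
      cases top <;>
        simp [List.getElem?_eq_getElem hlt', List.getD]

-- ===== VERDICT (by name: the statement is the Claim_ definition above) =====
theorem pick_resume_spec : Claim_equal_pick_resume := by
  intro resume _ hpre
  have hne : resume.length ≠ 0 := by
    simpa [List.length_eq_zero_iff] using hpre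
  unfold Spec_pick_resume pick_resume pick_resume_alt
  have key := loop_agree resume resume.length 0 (resume.length : Int) true
    (by omega) le_rfl (by omega) le_rfl
  have hseg : (resume.drop (0 : Int).toNat).take ((resume.length : Int) - 0).toNat = resume := by
    simp
  rw [hseg, if_pos rfl] at key
  rw [key]
  have hb := altLoopB_bounds resume.length 0 (resume.length : Int) true (by omega)
  set f := altLoopB resume.length 0 (resume.length : Int) true with hfdef
  have hfn : f = ((f.toNat : Nat) : Int) := by omega
  rw [hfn, PySem.List.pyGet?_natCast]
  have hflt : f.toNat < resume.length := by omega
  simp [PySem.List.pyGet?, PySem.List.pyIdx?, List.getD, max_eq_left hb.1,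
    List.getElem?_eq_getElem hflt]
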